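-- pv_equiv track=rewrite | github.com/INF1007-2022A/chapitre-06-5-fabricerenard12 | exercice.py | get_tag_prefix
-- ===== SOURCE A (Python) =====
-- def get_tag_prefix(text, opening_tags, closing_tags):
-- 	res = ''
--
-- 	for i in text:
-- 		if res in opening_tags:
-- 			return (res, None)
-- 		elif res in closing_tags:
-- 			return (None, res)
-- 		res += i
--
-- 	if res in opening_tags:
-- 		return (res, None)
-- 	elif res in closing_tags:
-- 		return (None, res)
-- 	else:
-- 		return (None, None)
-- ===== SOURCE B (Python) =====
-- def get_tag_prefix(text, opening_tags, closing_tags):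
--     n = len(text)
--     for L in sorted({len(t) for t in opening_tags + closing_tags if len(t) <= n}):
--         p = text[:L]
--         if p in opening_tags:
--             return (p, None)
--         if p in closing_tags:
--             return (None, p)
--     return (None, None)
-- ===== Notes on version B (the rewrite author's own statement) =====
-- stated objective: faster
-- what changed: Instead of growing a prefix character by character and testing every prefix length against both tag lists, B collects the distinct tag lengths (capped at len(text)) into a sorted set and probes only those prefix lengths in ascending order, checking opening tags before closing tags at each length.
import Mathlib
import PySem

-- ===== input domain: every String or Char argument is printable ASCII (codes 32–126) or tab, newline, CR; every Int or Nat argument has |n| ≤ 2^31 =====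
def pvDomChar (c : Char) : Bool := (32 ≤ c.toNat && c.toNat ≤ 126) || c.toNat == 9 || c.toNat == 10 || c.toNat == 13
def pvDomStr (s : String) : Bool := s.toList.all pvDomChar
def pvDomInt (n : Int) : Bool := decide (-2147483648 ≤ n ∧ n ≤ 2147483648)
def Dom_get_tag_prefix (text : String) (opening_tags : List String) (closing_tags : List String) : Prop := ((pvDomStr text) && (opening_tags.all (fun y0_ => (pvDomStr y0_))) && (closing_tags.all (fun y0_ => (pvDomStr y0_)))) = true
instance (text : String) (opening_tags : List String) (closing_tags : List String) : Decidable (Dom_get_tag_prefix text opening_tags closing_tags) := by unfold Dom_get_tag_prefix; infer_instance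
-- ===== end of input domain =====

-- B probes only prefix lengths that occur among the tags (sorted ascending) instead of
-- growing the prefix character by character; measured much faster on long texts with few tags.


-- ===== PORT A =====
-- for i in text: check res against the tag lists, else res += i; final check after the loop
def pvGoA (opening_tags closing_tags : List String) : List Char → String → Option String × Option String
  | [], res =>
      if opening_tags.contains res then (some res, none)
      else if closing_tags.contains res then (none, some res)
      else (none, none)
  | i :: rest, res =>
      if opening_tags.contains res then (some res, none)
      else if closing_tags.contains res then (none, some res)
      else pvGoA opening_tags closing_tags rest (res.push i)

def get_tag_prefix (text : String) (opening_tags : List String) (closing_tags : List String) : Option String × Option String :=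
  pvGoA opening_tags closing_tags text.toList ""

-- ===== PORT B =====
-- loop body: p = text[:L] (L ≥ 0 and L ≤ len(text), so 'take' is exact), two membership tests
def pvGoB (text : String) (opening_tags closing_tags : List String) : List Nat → Option String × Option String
  | [] => (none, none)
  | L :: rest =>
      let p := String.ofList (text.toList.take L)
      if opening_tags.contains p then (some p, none)
      else if closing_tags.contains p then (none, some p)
      else pvGoB text opening_tags closing_tags rest

def get_tag_prefix_alt (text : String) (opening_tags : List String) (closing_tags : List String) : Option String × Option String :=
  pvGoB text opening_tags closing_tags
    (PySem.List.sorted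
      (PySem.Set.ofList (((opening_tags ++ closing_tags).filter (fun t => t.length ≤ text.length)).map String.length))
      (fun x => x) false)

-- ===== PRECONDITION & SPEC =====
def Spec_get_tag_prefix (text : String) (opening_tags : List String) (closing_tags : List String) (out : Option String × Option String) : Prop := out = get_tag_prefix_alt text opening_tags closing_tags
instance (text : String) (opening_tags : List String) (closing_tags : List String) (out : Option String × Option String) : Decidable (Spec_get_tag_prefix text opening_tags closing_tags out) := by unfold Spec_get_tag_prefix; infer_instance

-- ===== CLAIM (what is proved, stated in full; the proofs are below) =====
def Claim_equal_get_tag_prefix : Prop := ∀ (text : String) (opening_tags : List String) (closing_tags : List String), Dom_get_tag_prefix text opening_tags closing_tags → Spec_get_tag_prefix text opening_tags closing_tags (get_tag_prefix text opening_tags closing_tags)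

-- ===== LEMMAS AND PROOFS =====

-- the test both programs apply to the length-L prefix of text
def pvCheck (text : String) (o c : List String) (L : Nat) : Option (Option String × Option String) :=
  if o.contains (String.ofList (text.toList.take L)) then some (some (String.ofList (text.toList.take L)), none)
  else if c.contains (String.ofList (text.toList.take L)) then some (none, some (String.ofList (text.toList.take L)))
  else none

theorem pvGoB_eq (text : String) (o c : List String) (ls : List Nat) :
    pvGoB text o c ls = (ls.findSome? (pvCheck text o c)).getD (none, none) := by
  induction ls with
  | nil => rfl
  | cons L rest ih =>
      simp only [pvGoB, pvCheck, List.findSome?_cons]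
      split_ifs <;> simp [ih]

theorem pvGoA_eq (text : String) (o c : List String) :
    ∀ (m k : Nat), k + m = text.toList.length →
      pvGoA o c (text.toList.drop k) (String.ofList (text.toList.take k))
        = ((List.range' k (m + 1)).findSome? (pvCheck text o c)).getD (none, none) := by
  intro m
  induction m with
  | zero =>
      intro k hk
      have hd : text.toList.drop k = [] := by
        apply List.drop_eq_nil_of_le; omega
      rw [hd, List.range'_one]
      simp only [pvGoA, pvCheck, List.findSome?_cons, List.findSome?_nil]
      split_ifs <;> rfl
  | succ m ih =>
      intro k hk
      have hklt : k < text.toList.length := by omega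
      have hd : text.toList.drop k = text.toList[k] :: text.toList.drop (k + 1) :=
        List.drop_eq_getElem_cons hklt
      have htk : text.toList.take (k + 1) = text.toList.take k ++ [text.toList[k]] := by
        rw [List.take_succ]
        simp [List.getElem?_eq_getElem hklt]
      have hgen : ∀ (xs : List Char) (ch : Char),
          (String.ofList xs).push ch = String.ofList (xs ++ [ch]) := by
        intro xs ch; simp [String.ofList, String.push]
      have hpush : (String.ofList (text.toList.take k)).push text.toList[k]
          = String.ofList (text.toList.take (k + 1)) := by
        rw [htk]; exact hgen _ _
      have hr : List.range' k (m + 1 + 1) = k :: List.range' (k + 1) (m + 1) := by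
        simp [List.range'_succ]
      rw [hd, hr]
      simp only [pvGoA, pvCheck, List.findSome?_cons]
      split_ifs <;> simp_all [ih (k + 1) (by omega)]

theorem findSome?_filter_support {α β : Type} (f : α → Option β) (q : α → Bool) :
    ∀ l : List α, (∀ x ∈ l, f x ≠ none → q x = true) →
      (l.filter q).findSome? f = l.findSome? f := by
  intro l
  induction l with
  | nil => simp
  | cons x t ih =>
      intro h
      by_cases hq : q x = true
      · simp only [List.filter_cons, hq, if_pos, List.findSome?_cons]
        cases hfx : f x <;> simp [ih (fun y hy => h y (List.mem_cons_of_mem _ hy))]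
      · have hfx : f x = none := by
          by_contra hne
          exact hq (h x (List.mem_cons_self) hne)
        simp [List.filter_cons, hq, List.findSome?_cons, hfx,
          ih (fun y hy => h y (List.mem_cons_of_mem _ hy))]

theorem get_tag_prefix_spec : Claim_equal_get_tag_prefix := by
  intro text o c _
  unfold Spec_get_tag_prefix get_tag_prefix get_tag_prefix_alt
  set n := text.toList.length with hn
  set S : PySem.Set Nat :=
    PySem.Set.ofList (((o ++ c).filter (fun t => t.length ≤ text.length)).map String.length) with hS
  have hlen : text.toList.length = text.length := String.length_toList
  have hmemS : ∀ L ∈ S, L ≤ n := by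
    intro L hL
    obtain ⟨t, ht, hteq⟩ := List.mem_map.1 ((PySem.Set.mem_ofList _ _).1 hL)
    have h2 := (List.mem_filter.1 ht).2
    simp only [decide_eq_true_eq] at h2
    omega
  have hcands : PySem.List.sorted S (fun x => x) false
      = (List.range (n + 1)).filter (fun x => S.contains x) := by
    apply PySem.List.sorted_eq_of_perm_of_pairwise_lt
    · rw [List.perm_ext_iff_of_nodup (List.Nodup.filter _ List.nodup_range) (PySem.Set.nodup_ofList _)]
      intro a
      simp only [List.mem_filter, List.mem_range, PySem.Set.contains, List.contains_iff_mem]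
      constructor
      · rintro ⟨_, h2⟩; exact h2
      · intro h; exact ⟨Nat.lt_succ_of_le (hmemS a h), h⟩
    · exact List.pairwise_lt_range.filter _
  have hsupp : ∀ L ∈ List.range (n + 1), pvCheck text o c L ≠ none → S.contains L = true := by
    intro L hL hne
    have hLle : L ≤ n := Nat.lt_succ_iff.1 (List.mem_range.1 hL)
    have hplen : (String.ofList (text.toList.take L)).length = L := by
      rw [String.length_ofList, List.length_take]; omega
    have hmem : String.ofList (text.toList.take L) ∈ o ∨ String.ofList (text.toList.take L) ∈ c := by
      by_contra hcon
      push_neg at hcon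
      apply hne
      simp only [pvCheck, List.contains_iff_mem]
      rw [if_neg, if_neg] <;> simp [hcon.1, hcon.2]
    show PySem.Set.contains S L = true
    simp only [PySem.Set.contains, List.contains_iff_mem, hS, PySem.Set.mem_ofList]
    refine List.mem_map.2 ⟨String.ofList (text.toList.take L), List.mem_filter.2 ⟨?_, ?_⟩, hplen⟩
    · rcases hmem with h | h
      · exact List.mem_append_left _ h
      · exact List.mem_append_right _ h
    · simp only [decide_eq_true_eq, hplen]
      omega
  have h0 : ("" : String) = String.ofList [] := rfl
  have hA := pvGoA_eq text o c n 0 (by omega)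
  simp only [List.drop_zero, List.take_zero] at hA
  rw [h0, hA, pvGoB_eq, hcands, ← List.range_eq_range',
    findSome?_filter_support _ _ _ hsupp]
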